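-- pv_equiv track=rewrite | github.com/lariskovski/search-engine | searchengine/searcher.py | lookup_best
-- ===== SOURCE A (Python) =====
-- def lookup(index:list, keyword:str) -> list:
--     if keyword in index:
--         return index[keyword]
--     return None
--
-- def lookup_best(index: dict, keyword: str, ranks: dict) -> str:
--     urls_for_kw: list = lookup(index, keyword)
--
--     if urls_for_kw:
--         # Get set intersection between all possible urls for a given keyword and the ranked dictionary
--         url_rank_intersection: set = set(urls_for_kw).intersection(set(ranks.keys()))
--         # transforms set into a dict for later sorting
--         selected_ranks: dict = {key : ranks[key] for key in url_rank_intersection}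
--         # sorts values in reverse order. gets most popular page
--         sort_selected_rank:list = [k for k, v in sorted(selected_ranks.items(), key=lambda item: item[1], reverse=True)]
--
--         best_url = sort_selected_rank[0]
--
--         return best_url
--
--     return None
-- ===== SOURCE B (Python) =====
-- def lookup_best(index: dict, keyword: str, ranks: dict) -> str:
--     best = None  # (url, rank) of the current strict maximum
--     for url in index.get(keyword) or ():
--         if url in ranks and (best is None or ranks[url] > best[1]):
--             best = (url, ranks[url])
--     return best[0] if best is not None else None
-- ===== Notes on version B (the rewrite author's own statement) =====
-- stated objective: simpler
-- what changed: Replaces the set-intersection + dict comprehension + stable reverse sort with a single linear scan over the keyword's url list that keeps the url of strictly maximal rank, returning None (instead of raising IndexError) when no url is ranked.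
-- outside the precondition, e.g. on lookup_best({'k': ['x', 'y']}, 'k', {'x': 1, 'y': 1}): A returns 'y', B returns 'x'
import Mathlib
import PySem

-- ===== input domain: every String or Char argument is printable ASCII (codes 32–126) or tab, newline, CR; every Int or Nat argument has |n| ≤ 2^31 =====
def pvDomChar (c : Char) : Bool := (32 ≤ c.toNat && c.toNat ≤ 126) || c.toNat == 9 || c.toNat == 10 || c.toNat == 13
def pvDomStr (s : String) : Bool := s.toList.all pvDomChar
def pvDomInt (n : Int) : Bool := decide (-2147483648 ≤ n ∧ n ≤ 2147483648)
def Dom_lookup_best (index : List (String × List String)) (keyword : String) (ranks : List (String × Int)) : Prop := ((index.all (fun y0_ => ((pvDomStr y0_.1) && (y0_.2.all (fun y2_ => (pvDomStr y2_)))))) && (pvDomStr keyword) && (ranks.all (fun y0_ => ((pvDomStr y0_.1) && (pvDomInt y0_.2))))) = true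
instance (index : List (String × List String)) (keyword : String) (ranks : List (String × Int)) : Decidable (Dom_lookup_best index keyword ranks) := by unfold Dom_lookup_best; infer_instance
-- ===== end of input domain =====

-- B replaces A's set-intersection + dict build + stable reverse sort by one linear max-scan over the keyword's url list (simpler; B returns None where A raises IndexError on an unranked url list).


-- ===== PORT A =====
-- A's helper `lookup`: `index[keyword]` if `keyword in index` else None
def pvLookup (index : List (String × List String)) (keyword : String) : Option (List String) :=
  if (PySem.Dict.mk index).contains keyword then (PySem.Dict.mk index).get? keyword else none

def lookup_best (index : List (String × List String)) (keyword : String) (ranks : List (String × Int)) : Option String :=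
  match pvLookup index keyword with
  | some urls =>
    if urls.isEmpty then none
    else
      let inter : PySem.Set String :=
        PySem.Set.inter (PySem.Set.ofList urls) (PySem.Set.ofList ((PySem.Dict.mk ranks).keys))
      let selected : PySem.Dict String Int :=
        inter.foldl (fun d k => d.insert k (((PySem.Dict.mk ranks).get? k).getD 0)) (PySem.Dict.mk [])
      let sortSel : List String :=
        (PySem.List.sorted selected.items (fun kv => kv.2) true).map (fun kv => kv.1)
      PySem.List.pyGet? sortSel 0   -- sort_selected_rank[0]; none = IndexError, excluded by Pre_
  | none => none

-- ===== PORT B =====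
-- loop body of Source B: keep the (url, rank) of the strictly maximal rank seen so far
def pvStep (ranks : List (String × Int)) (best : Option (String × Int)) (url : String) : Option (String × Int) :=
  match (PySem.Dict.mk ranks).get? url with
  | some r =>
    match best with
    | none => some (url, r)
    | some p => if p.2 < r then some (url, r) else best
  | none => best

def lookup_best_alt (index : List (String × List String)) (keyword : String) (ranks : List (String × Int)) : Option String :=
  (((((PySem.Dict.mk index).get? keyword).getD []).foldl (pvStep ranks) none).map (fun p => p.1))

-- ===== PRECONDITION & SPEC =====
-- rank of a url (total form; only used under membership in ranks)
def pvRk (ranks : List (String × Int)) (u : String) : Int := ((PySem.Dict.mk ranks).get? u).getD 0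
-- the urls of the keyword that are ranked, first occurrences in order
def pvInter (urls : List String) (ranks : List (String × Int)) : List String :=
  (PySem.List.dedup urls).filter (fun u => (PySem.Dict.mk ranks).contains u)
def pvIsMax (urls : List String) (ranks : List (String × Int)) (u : String) : Bool :=
  (pvInter urls ranks).all (fun v => pvRk ranks v ≤ pvRk ranks u)

-- Pre_ excludes inputs where A raises IndexError (a nonempty url list none of whose urls is ranked) and
-- inputs where several ranked urls tie for the maximal rank, where A's answer is an accident of Python's
-- set-hash iteration order (both A's and B's choices are defensible there).
def Pre_lookup_best (index : List (String × List String)) (keyword : String) (ranks : List (String × Int)) : Prop :=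
  (match (PySem.Dict.mk index).get? keyword with
   | none => true
   | some urls =>
     urls.isEmpty ||
       (!(pvInter urls ranks).isEmpty &&
        ((pvInter urls ranks).filter (pvIsMax urls ranks)).length == 1)) = true
instance (index : List (String × List String)) (keyword : String) (ranks : List (String × Int)) : Decidable (Pre_lookup_best index keyword ranks) := by unfold Pre_lookup_best; infer_instance

def pvWitness_lookup_best : (List (String × List String)) × String × (List (String × Int)) :=
  ([("k", ["a", "b"])], "k", [("a", 2), ("b", 1)])

def Spec_lookup_best (index : List (String × List String)) (keyword : String) (ranks : List (String × Int)) (out : Option String) : Prop := out = lookup_best_alt index keyword ranks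
instance (index : List (String × List String)) (keyword : String) (ranks : List (String × Int)) (out : Option String) : Decidable (Spec_lookup_best index keyword ranks out) := by unfold Spec_lookup_best; infer_instance

-- ===== CLAIM (what is proved, stated in full; the proofs are below) =====
def Claim_equal_lookup_best : Prop := ∀ (index : List (String × List String)) (keyword : String) (ranks : List (String × Int)), Dom_lookup_best index keyword ranks → Pre_lookup_best index keyword ranks → Spec_lookup_best index keyword ranks (lookup_best index keyword ranks)
-- ===== LEMMAS AND PROOFS =====

-- `keyword in d` is `d.get? keyword ≠ none`
theorem pv_contains_eq_isSome {ν : Type} (l : List (String × ν)) (k : String) :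
    (PySem.Dict.mk l).contains k = ((PySem.Dict.mk l).get? k).isSome := by
  induction l with
  | nil => rfl
  | cons p t ih =>
    simp only [PySem.Dict.contains, PySem.Dict.get?, List.any_cons, List.find?_cons] at *
    by_cases h : p.1 == k
    · simp [h]
    · simp [h] at *; simpa using ih

-- A's set intersection is pvInter
theorem pv_interA_eq (urls : List String) (ranks : List (String × Int)) :
    PySem.Set.inter (PySem.Set.ofList urls) (PySem.Set.ofList ((PySem.Dict.mk ranks).keys))
      = pvInter urls ranks := by
  simp only [PySem.Set.inter, pvInter, PySem.List.dedup]
  apply List.filter_congr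
  intro u hu
  rw [Bool.eq_iff_iff]
  simp only [PySem.Set.contains, PySem.Dict.contains, PySem.Dict.keys,
    List.contains_iff_mem, PySem.Set.mem_ofList, List.mem_map, List.any_eq_true, beq_iff_eq]

-- items of the dict A builds over the (nodup) intersection
theorem pv_items_foldl_insert (f : String → Int) (l : List String) (d : PySem.Dict String Int)
    (h : ∀ k ∈ l, d.contains k = false) (hnd : l.Nodup) :
    (l.foldl (fun d k => d.insert k (f k)) d).items = d.items ++ l.map (fun k => (k, f k)) := by
  induction l generalizing d with
  | nil => simp
  | cons x xs ih =>
    have hx : d.contains x = false := h x (by simp)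
    have hins : (d.insert x (f x)).items = d.items ++ [(x, f x)] := by
      simp [PySem.Dict.insert, hx]
    rw [List.foldl_cons, ih]
    · simp [hins]
    · intro k hk
      have hkx : ¬ (k = x) := fun he => (List.nodup_cons.mp hnd).1 (he ▸ hk)
      simp [PySem.Dict.contains, hins, List.any_append]
      refine ⟨?_, fun he => hkx he.symm⟩
      have := h k (List.mem_cons_of_mem _ hk)
      simpa [PySem.Dict.contains] using this
    · exact (List.nodup_cons.mp hnd).2

-- invariant of B's fold
def pvGood (ranks : List (String × Int)) (dom : List String) (s : Option (String × Int)) : Prop :=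
  match s with
  | none => ∀ v ∈ dom, (PySem.Dict.mk ranks).get? v = none
  | some p => p.1 ∈ dom ∧ (PySem.Dict.mk ranks).get? p.1 = some p.2 ∧
      ∀ v ∈ dom, ∀ rv, (PySem.Dict.mk ranks).get? v = some rv → rv ≤ p.2

theorem pv_fold_good (ranks : List (String × Int)) (l : List String) : ∀ (dom : List String)
    (s : Option (String × Int)), pvGood ranks dom s →
    pvGood ranks (dom ++ l) (l.foldl (pvStep ranks) s) := by
  induction l with
  | nil => intro dom s hs; simpa using hs
  | cons x xs ih =>
    intro dom s hs
    have step : pvGood ranks (dom ++ [x]) (pvStep ranks s x) := by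
      unfold pvStep
      cases hx : (PySem.Dict.mk ranks).get? x with
      | none =>
        cases s with
        | none =>
          intro v hv
          rcases List.mem_append.mp hv with h | h
          · exact hs v h
          · simp at h; subst h; exact hx
        | some p =>
          obtain ⟨h1, h2, h3⟩ := hs
          refine ⟨List.mem_append_left _ h1, h2, ?_⟩
          intro v hv rv hrv
          rcases List.mem_append.mp hv with h | h
          · exact h3 v h rv hrv
          · simp at h; subst h; simp [hx] at hrv
      | some r =>
        cases s with
        | none =>
          refine ⟨by simp, hx, ?_⟩
          intro v hv rv hrv
          rcases List.mem_append.mp hv with h | h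
          · simp [hs v h] at hrv
          · simp at h; subst h; rw [hx] at hrv; injection hrv with he; omega
        | some p =>
          obtain ⟨h1, h2, h3⟩ := hs
          by_cases hlt : p.2 < r
          · simp only [hlt, if_true]
            refine ⟨by simp, hx, ?_⟩
            intro v hv rv hrv
            rcases List.mem_append.mp hv with h | h
            · exact le_of_lt (lt_of_le_of_lt (h3 v h rv hrv) hlt)
            · simp at h; subst h; rw [hx] at hrv; injection hrv with he; omega
          · simp only [hlt, if_false]
            refine ⟨List.mem_append_left _ h1, h2, ?_⟩
            intro v hv rv hrv
            rcases List.mem_append.mp hv with h | h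
            · exact h3 v h rv hrv
            · simp at h; subst h; rw [hx] at hrv; injection hrv with he; omega
    have := ih (dom ++ [x]) _ step
    simpa [List.append_assoc] using this

-- ===== VERDICT (by name: the statement is the Claim_ definition above) =====
theorem lookup_best_spec : Claim_equal_lookup_best := by
  intro index keyword ranks _ hpre
  unfold Spec_lookup_best
  unfold Pre_lookup_best at hpre
  cases hkw : (PySem.Dict.mk index).get? keyword with
  | none =>
    have hc : (PySem.Dict.mk index).contains keyword = false := by
      rw [pv_contains_eq_isSome, hkw]; rfl
    simp [lookup_best, lookup_best_alt, pvLookup, hc, hkw]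
  | some urls =>
    have hc : (PySem.Dict.mk index).contains keyword = true := by
      rw [pv_contains_eq_isSome, hkw]; rfl
    rw [hkw] at hpre
    by_cases hemp : urls.isEmpty
    · have he : urls = [] := List.isEmpty_iff.mp hemp
      subst he
      simp [lookup_best, lookup_best_alt, pvLookup, hc, hkw]
    · simp only [hemp, Bool.false_or, Bool.and_eq_true, Bool.not_eq_eq_eq_not,
        Bool.not_true, beq_iff_eq] at hpre
      obtain ⟨hI0, hlen⟩ := hpre
      have hI : pvInter urls ranks ≠ [] := by
        intro he; rw [he] at hI0; simp at hI0
      obtain ⟨ustar, hfil⟩ := List.length_eq_one_iff.mp hlen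
      -- any maximal element of the intersection is ustar
      have huniq : ∀ u, u ∈ pvInter urls ranks → pvIsMax urls ranks u = true → u = ustar := by
        intro u hu hmax
        have : u ∈ (pvInter urls ranks).filter (pvIsMax urls ranks) :=
          List.mem_filter.mpr ⟨hu, hmax⟩
        rw [hfil] at this; simpa using this
      -- ===== A's value =====
      have hitems : ((pvInter urls ranks).foldl
          (fun d k => d.insert k (((PySem.Dict.mk ranks).get? k).getD 0)) (PySem.Dict.mk [])).items
          = (pvInter urls ranks).map (fun u => (u, pvRk ranks u)) := by
        have h0 : ∀ k ∈ pvInter urls ranks, (PySem.Dict.mk ([] : List (String × Int))).contains k = false := by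
          intro k _; rfl
        have hnd : (pvInter urls ranks).Nodup :=
          (PySem.List.nodup_dedup urls).filter _
        simpa [pvRk] using pv_items_foldl_insert (pvRk ranks) (pvInter urls ranks) (PySem.Dict.mk []) h0 hnd
      have hA : lookup_best index keyword ranks
          = PySem.List.pyGet? ((PySem.List.sorted
              ((pvInter urls ranks).map (fun u => (u, pvRk ranks u))) (fun kv => kv.2) true).map
              (fun kv => kv.1)) 0 := by
        simp only [lookup_best, pvLookup, hc, if_true, hkw, hemp, Bool.false_eq_true, if_false,
          pv_interA_eq, hitems]
      set items := (pvInter urls ranks).map (fun u => (u, pvRk ranks u)) with hitemsdef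
      have hitems_ne : items ≠ [] := by
        intro he
        exact hI (List.map_eq_nil_iff.mp he)
      cases hsort : PySem.List.sorted items (fun kv => kv.2) true with
      | nil =>
        exfalso
        have := PySem.List.length_sorted items (fun kv => kv.2) true
        rw [hsort] at this
        exact hitems_ne (List.length_eq_zero_iff.mp this.symm)
      | cons m t =>
        have hAval : lookup_best index keyword ranks = some m.1 := by
          rw [hA, hsort]
          simp [PySem.List.pyGet?, PySem.List.pyIdx?]
        have hm_mem : m ∈ items := by
          have hperm := PySem.List.sorted_perm items (fun kv => kv.2) true
          rw [hsort] at hperm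
          exact hperm.mem_iff.mp (by simp)
        have hm_ge : ∀ y ∈ items, y.2 ≤ m.2 :=
          PySem.List.key_head_sorted_rev_ge items (fun kv => kv.2) hsort
        obtain ⟨u, hu_mem, hu_eq⟩ := List.mem_map.mp hm_mem
        have hu_max : pvIsMax urls ranks u = true := by
          unfold pvIsMax
          rw [List.all_eq_true]
          intro v hv
          have : (v, pvRk ranks v) ∈ items := List.mem_map.mpr ⟨v, hv, rfl⟩
          have := hm_ge _ this
          rw [← hu_eq] at this
          simpa using this
        have hu_star : u = ustar := huniq u hu_mem hu_max
        -- ===== B's value =====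
        have hgood : pvGood ranks urls (urls.foldl (pvStep ranks) none) := by
          have h0 : pvGood ranks [] none := by intro v hv; simp at hv
          simpa using pv_fold_good ranks urls [] none h0
        have hB : lookup_best_alt index keyword ranks
            = ((urls.foldl (pvStep ranks) none).map (fun p => p.1)) := by
          simp [lookup_best_alt, hkw]
        cases hres : urls.foldl (pvStep ranks) none with
        | none =>
          exfalso
          rw [hres] at hgood
          obtain ⟨v, hv⟩ := List.exists_mem_of_ne_nil _ hI
          have hvI := hv
          unfold pvInter at hv
          have hv_urls : v ∈ urls :=
            (PySem.List.mem_dedup urls v).mp (List.mem_filter.mp hv).1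
          have hv_cont : (PySem.Dict.mk ranks).contains v = true := by
            simpa using (List.mem_filter.mp hv).2
          rw [pv_contains_eq_isSome] at hv_cont
          rw [hgood v hv_urls] at hv_cont
          simp at hv_cont
        | some p =>
          rw [hres] at hgood
          obtain ⟨hb1, hb2, hb3⟩ := hgood
          have hbI : p.1 ∈ pvInter urls ranks := by
            unfold pvInter
            refine List.mem_filter.mpr ⟨(PySem.List.mem_dedup urls p.1).mpr hb1, ?_⟩
            show (PySem.Dict.mk ranks).contains p.1 = true
            rw [pv_contains_eq_isSome, hb2]; rfl
          have hbrk : pvRk ranks p.1 = p.2 := by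
            unfold pvRk; rw [hb2]; rfl
          have hb_max : pvIsMax urls ranks p.1 = true := by
            unfold pvIsMax
            rw [List.all_eq_true]
            intro v hv
            have hv_urls : v ∈ urls :=
              (PySem.List.mem_dedup urls v).mp (List.mem_filter.mp hv).1
            have hv_cont : (PySem.Dict.mk ranks).contains v = true := by
              simpa using (List.mem_filter.mp hv).2
            rw [pv_contains_eq_isSome] at hv_cont
            cases hg : (PySem.Dict.mk ranks).get? v with
            | none => rw [hg] at hv_cont; simp at hv_cont
            | some w =>
              have : w ≤ p.2 := hb3 v hv_urls w hg
              have hrkv : pvRk ranks v = w := by unfold pvRk; rw [hg]; rfl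
              simp [hrkv, hbrk, this]
          have hb_star : p.1 = ustar := huniq p.1 hbI hb_max
          rw [hAval, hB, hres]
          have hm1 : m.1 = ustar := by rw [← hu_eq]; exact hu_star
          simp [hm1, hb_star]
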